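-- pv_equiv track=rewrite | github.com/pypi-data/pypi-mirror-372 | packages/conflict-collection/conflict_collection-0.0.1-py3-none-any.whl/conflict_collection/metrics/anchored_ratio/anchored_ratio.py | _micro_boundaries_for_union
-- ===== SOURCE A (Python) =====
-- from typing import Dict, Literal, Tuple
--
-- Tag = Literal["replace", "delete", "insert", "equal"]
--
-- def _micro_boundaries_for_union(
--     merged_union_intervals: list[Tuple[int, int]],
--     O_vs_R: list[Tuple[Tag, int, int, int, int]],
--     O_vs_R_hat: list[Tuple[Tag, int, int, int, int]],
-- ) -> list[Tuple[int, int, list[int]]]: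
--     """
--     For each merged union interval [union_start, union_end), collect micro-boundaries:
--       {union_start, opcode boundaries strictly inside, union_end}.
--     These micro-intervals are used only for denominator accounting.
--     """
--     results: list[Tuple[int, int, list[int]]] = []
--     for union_start, union_end in merged_union_intervals:
--         boundary_points = {union_start, union_end}
--         for tag, base_start, base_end, _, _ in O_vs_R:
--             if union_start < base_start < union_end:
--                 boundary_points.add(base_start)
--             if union_start < base_end < union_end:
--                 boundary_points.add(base_end)
--         for tag, base_start, base_end, _, _ in O_vs_R_hat:
--             if union_start < base_start < union_end:
--                 boundary_points.add(base_start)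
--             if union_start < base_end < union_end:
--                 boundary_points.add(base_end)
--         results.append((union_start, union_end, sorted(boundary_points)))
--     return results
-- ===== SOURCE B (Python) =====
-- from bisect import bisect_left, bisect_right
-- from typing import Tuple
--
--
-- def _micro_boundaries_for_union(
--     merged_union_intervals: list,
--     O_vs_R: list,
--     O_vs_R_hat: list,
-- ) -> list:
--     # Deduplicate and sort every opcode boundary point once, then read off the
--     # points strictly inside each union interval with two binary searches.
--     pts = sorted({p for op in O_vs_R + O_vs_R_hat for p in (op[1], op[2])})
--     results = []
--     for us, ue in merged_union_intervals:
--         inner = pts[bisect_right(pts, us):bisect_left(pts, ue)]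
--         results.append((us, ue, sorted({us, ue, *inner})))
--     return results
-- ===== Notes on version B (the rewrite author's own statement) =====
-- stated objective: faster
-- what changed: B deduplicates and sorts all opcode boundary points once globally and then extracts each interval's interior points with two binary searches, instead of A's per-interval rescan of every opcode followed by a per-interval set build and sort.
import Mathlib
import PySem

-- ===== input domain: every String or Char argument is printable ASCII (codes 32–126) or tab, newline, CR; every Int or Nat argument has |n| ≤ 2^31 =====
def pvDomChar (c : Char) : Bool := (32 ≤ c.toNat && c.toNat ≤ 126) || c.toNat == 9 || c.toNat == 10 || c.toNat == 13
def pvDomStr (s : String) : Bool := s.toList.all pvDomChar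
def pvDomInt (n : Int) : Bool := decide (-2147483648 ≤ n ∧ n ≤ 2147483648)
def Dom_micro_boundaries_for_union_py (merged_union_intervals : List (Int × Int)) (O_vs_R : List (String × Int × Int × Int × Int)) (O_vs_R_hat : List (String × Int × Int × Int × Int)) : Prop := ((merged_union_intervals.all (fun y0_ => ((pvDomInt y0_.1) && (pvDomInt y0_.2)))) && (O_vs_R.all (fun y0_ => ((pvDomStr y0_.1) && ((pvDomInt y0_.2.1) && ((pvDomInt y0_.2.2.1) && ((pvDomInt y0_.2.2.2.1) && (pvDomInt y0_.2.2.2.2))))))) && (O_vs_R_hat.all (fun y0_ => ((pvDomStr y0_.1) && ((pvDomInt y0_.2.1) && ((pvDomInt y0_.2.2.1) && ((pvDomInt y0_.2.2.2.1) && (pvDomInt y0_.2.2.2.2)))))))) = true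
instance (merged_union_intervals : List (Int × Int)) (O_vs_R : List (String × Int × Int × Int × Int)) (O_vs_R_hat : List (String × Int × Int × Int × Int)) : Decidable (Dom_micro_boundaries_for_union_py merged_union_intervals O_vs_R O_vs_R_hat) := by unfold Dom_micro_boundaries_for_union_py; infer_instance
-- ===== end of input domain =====

-- B sorts the deduplicated opcode boundary points once and extracts each interval's interior
-- points with two binary searches, instead of A's per-interval opcode scan (faster).

-- ===== PORT A =====
-- literal transliteration of A: per interval, a set seeded with the endpoints, one pass over
-- each opcode list conditionally adding boundary points, then sorted(set).
def micro_boundaries_for_union_py (merged_union_intervals : List (Int × Int)) (O_vs_R : List (String × Int × Int × Int × Int)) (O_vs_R_hat : List (String × Int × Int × Int × Int)) : List (Int × Int × List Int) :=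
  merged_union_intervals.foldl (fun results p =>
    let union_start := p.1
    let union_end := p.2
    let bp : PySem.Set Int := PySem.Set.ofList [union_start, union_end]
    let bp := O_vs_R.foldl (fun s t =>
      let s := if union_start < t.2.1 ∧ t.2.1 < union_end then s.add t.2.1 else s
      if union_start < t.2.2.1 ∧ t.2.2.1 < union_end then s.add t.2.2.1 else s) bp
    let bp := O_vs_R_hat.foldl (fun s t =>
      let s := if union_start < t.2.1 ∧ t.2.1 < union_end then s.add t.2.1 else s
      if union_start < t.2.2.1 ∧ t.2.2.1 < union_end then s.add t.2.2.1 else s) bp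
    results ++ [(union_start, union_end, PySem.List.sorted bp (fun x => x))]) []

-- ===== PORT B =====
-- Source B's loop body: slice the globally sorted points, then sorted({us, ue, *inner})
def altBounds (pts : List Int) (us ue : Int) : List Int :=
  let inner := PySem.List.slice pts (some ((PySem.List.bisectRight pts us : Nat) : Int)) (some ((PySem.List.bisectLeft pts ue : Nat) : Int))
  PySem.List.sorted (PySem.Set.ofList (us :: ue :: inner)) (fun x => x)

def micro_boundaries_for_union_py_alt (merged_union_intervals : List (Int × Int)) (O_vs_R : List (String × Int × Int × Int × Int)) (O_vs_R_hat : List (String × Int × Int × Int × Int)) : List (Int × Int × List Int) :=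
  let pts := PySem.List.sorted (PySem.Set.ofList ((O_vs_R ++ O_vs_R_hat).flatMap (fun t => [t.2.1, t.2.2.1]))) (fun x => x)
  merged_union_intervals.foldl (fun results p => results ++ [(p.1, p.2, altBounds pts p.1 p.2)]) []

-- ===== PRECONDITION & SPEC =====
def Spec_micro_boundaries_for_union_py (merged_union_intervals : List (Int × Int)) (O_vs_R : List (String × Int × Int × Int × Int)) (O_vs_R_hat : List (String × Int × Int × Int × Int)) (out : List (Int × Int × List Int)) : Prop := out = micro_boundaries_for_union_py_alt merged_union_intervals O_vs_R O_vs_R_hat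
instance (merged_union_intervals : List (Int × Int)) (O_vs_R : List (String × Int × Int × Int × Int)) (O_vs_R_hat : List (String × Int × Int × Int × Int)) (out : List (Int × Int × List Int)) : Decidable (Spec_micro_boundaries_for_union_py merged_union_intervals O_vs_R O_vs_R_hat out) := by unfold Spec_micro_boundaries_for_union_py; infer_instance

-- ===== CLAIM (what is proved, stated in full; the proofs are below) =====
def Claim_equal_micro_boundaries_for_union_py : Prop := ∀ (merged_union_intervals : List (Int × Int)) (O_vs_R : List (String × Int × Int × Int × Int)) (O_vs_R_hat : List (String × Int × Int × Int × Int)), Dom_micro_boundaries_for_union_py merged_union_intervals O_vs_R O_vs_R_hat → Spec_micro_boundaries_for_union_py merged_union_intervals O_vs_R O_vs_R_hat (micro_boundaries_for_union_py merged_union_intervals O_vs_R O_vs_R_hat)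

-- ===== LEMMAS AND PROOFS =====

-- the boundary points contributed by one opcode list
def opPts (ops : List (String × Int × Int × Int × Int)) : List Int :=
  ops.flatMap (fun t => [t.2.1, t.2.2.1])

-- membership after one step of A's inner loop
theorem mem_step (us ue a b : Int) (s : PySem.Set Int) (x : Int) :
    x ∈ (if us < b ∧ b < ue then (if us < a ∧ a < ue then s.add a else s).add b
         else (if us < a ∧ a < ue then s.add a else s)) ↔
    x ∈ s ∨ (us < x ∧ x < ue ∧ (x = a ∨ x = b)) := by
  by_cases h1 : us < a ∧ a < ue <;> by_cases h2 : us < b ∧ b < ue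
  · rw [if_pos h2, if_pos h1]
    simp only [PySem.Set.mem_add]
    constructor
    · rintro ((hx | rfl) | rfl)
      · exact Or.inl hx
      · exact Or.inr ⟨h1.1, h1.2, Or.inl rfl⟩
      · exact Or.inr ⟨h2.1, h2.2, Or.inr rfl⟩
    · rintro (hx | ⟨hu, hv, rfl | rfl⟩)
      · exact Or.inl (Or.inl hx)
      · exact Or.inl (Or.inr rfl)
      · exact Or.inr rfl
  · rw [if_neg h2, if_pos h1]
    simp only [PySem.Set.mem_add]
    constructor
    · rintro (hx | rfl)
      · exact Or.inl hx
      · exact Or.inr ⟨h1.1, h1.2, Or.inl rfl⟩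
    · rintro (hx | ⟨hu, hv, rfl | rfl⟩)
      · exact Or.inl hx
      · exact Or.inr rfl
      · exact absurd ⟨hu, hv⟩ h2
  · rw [if_pos h2, if_neg h1]
    simp only [PySem.Set.mem_add]
    constructor
    · rintro (hx | rfl)
      · exact Or.inl hx
      · exact Or.inr ⟨h2.1, h2.2, Or.inr rfl⟩
    · rintro (hx | ⟨hu, hv, rfl | rfl⟩)
      · exact Or.inl hx
      · exact absurd ⟨hu, hv⟩ h1
      · exact Or.inr rfl
  · rw [if_neg h2, if_neg h1]
    constructor
    · exact Or.inl
    · rintro (hx | ⟨hu, hv, rfl | rfl⟩)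
      · exact hx
      · exact absurd ⟨hu, hv⟩ h1
      · exact absurd ⟨hu, hv⟩ h2

-- membership of A's inner loop accumulator
theorem mem_aloop (us ue : Int) (ops : List (String × Int × Int × Int × Int))
    (s : PySem.Set Int) (x : Int) :
    x ∈ ops.foldl (fun s t =>
      let s := if us < t.2.1 ∧ t.2.1 < ue then s.add t.2.1 else s
      if us < t.2.2.1 ∧ t.2.2.1 < ue then s.add t.2.2.1 else s) s ↔
    x ∈ s ∨ (us < x ∧ x < ue ∧ x ∈ opPts ops) := by
  induction ops generalizing s with
  | nil => simp [opPts]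
  | cons t ts ih =>
    simp only [List.foldl_cons]
    rw [ih, mem_step]
    simp only [opPts, List.flatMap_cons, List.mem_cons, List.mem_append,
      List.not_mem_nil, or_false]
    tauto

-- A's inner loop preserves Nodup
theorem nodup_aloop (us ue : Int) (ops : List (String × Int × Int × Int × Int))
    (s : PySem.Set Int) (h : s.Nodup) :
    (ops.foldl (fun s t =>
      let s := if us < t.2.1 ∧ t.2.1 < ue then s.add t.2.1 else s
      if us < t.2.2.1 ∧ t.2.2.1 < ue then s.add t.2.2.1 else s) s).Nodup := by
  induction ops generalizing s with
  | nil => exact h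
  | cons t ts ih =>
    simp only [List.foldl_cons]
    apply ih
    split_ifs <;>
      first
        | exact PySem.Set.nodup_add _ _ (PySem.Set.nodup_add _ _ h)
        | exact PySem.Set.nodup_add _ _ h
        | exact h

-- bisect slicing of a sorted list is exactly the strict-interior filter
theorem slice_eq_filter (pts : List Int) (us ue : Int) (h : pts.Pairwise (· ≤ ·)) :
    List.take (PySem.List.bisectLeft pts ue - PySem.List.bisectRight pts us)
      (List.drop (PySem.List.bisectRight pts us) pts) =
    pts.filter (fun p => decide (us < p) && decide (p < ue)) := by
  obtain ⟨hloLen, hlo1, hlo2⟩ := PySem.List.bisectRight_spec pts us h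
  obtain ⟨hhiLen, hhi1, hhi2⟩ := PySem.List.bisectLeft_spec pts ue h
  set lo := PySem.List.bisectRight pts us with hlo
  set hi := PySem.List.bisectLeft pts ue with hhi
  conv_rhs => rw [← List.take_append_drop lo pts, List.filter_append,
    ← List.take_append_drop (hi - lo) (List.drop lo pts), List.filter_append]
  have h1 : (List.take lo pts).filter (fun p => decide (us < p) && decide (p < ue)) = [] := by
    rw [List.filter_eq_nil_iff]
    intro a ha
    obtain ⟨i, hilen, rfl⟩ := List.mem_iff_getElem.mp ha
    have hiLen' : i < pts.length := by
      have := hilen; simp only [List.length_take] at this; omega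
    have hile : i < lo := by
      have := hilen; simp only [List.length_take] at this; omega
    rw [List.getElem_take]
    have := hlo1 i hiLen' hile
    simp only [Bool.and_eq_true, decide_eq_true_eq, not_and]
    omega
  have h3 : (List.drop (hi - lo) (List.drop lo pts)).filter
      (fun p => decide (us < p) && decide (p < ue)) = [] := by
    rw [List.drop_drop, List.filter_eq_nil_iff]
    intro a ha
    obtain ⟨i, hilen, rfl⟩ := List.mem_iff_getElem.mp ha
    have hiLen' : lo + (hi - lo) + i < pts.length := by
      have := hilen; simp only [List.length_drop] at this; omega
    rw [List.getElem_drop]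
    have := hhi2 (lo + (hi - lo) + i) hiLen' (by omega)
    simp only [Bool.and_eq_true, decide_eq_true_eq, not_and]
    omega
  have h2 : (List.take (hi - lo) (List.drop lo pts)).filter
      (fun p => decide (us < p) && decide (p < ue)) =
      List.take (hi - lo) (List.drop lo pts) := by
    rw [List.filter_eq_self]
    intro a ha
    obtain ⟨i, hilen, rfl⟩ := List.mem_iff_getElem.mp ha
    have hb : i < hi - lo ∧ lo + i < pts.length := by
      have := hilen; simp only [List.length_take, List.length_drop] at this; omega
    rw [List.getElem_take, List.getElem_drop]
    have hge := hlo2 (lo + i) hb.2 (by omega)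
    have hlt := hhi1 (lo + i) hb.2 (by omega)
    simp only [Bool.and_eq_true, decide_eq_true_eq]
    omega
  rw [h1, h2, h3, List.append_nil, List.nil_append]

-- the per-interval equality: A's set and B's set hold the same points, so their sorts agree
theorem per_interval (O_vs_R O_vs_R_hat : List (String × Int × Int × Int × Int)) (us ue : Int) :
    PySem.List.sorted
      (O_vs_R_hat.foldl (fun (s : PySem.Set Int) t =>
        let s := if us < t.2.1 ∧ t.2.1 < ue then s.add t.2.1 else s
        if us < t.2.2.1 ∧ t.2.2.1 < ue then s.add t.2.2.1 else s)
        (O_vs_R.foldl (fun (s : PySem.Set Int) t =>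
          let s := if us < t.2.1 ∧ t.2.1 < ue then s.add t.2.1 else s
          if us < t.2.2.1 ∧ t.2.2.1 < ue then s.add t.2.2.1 else s)
          (PySem.Set.ofList [us, ue]))) (fun x => x) =
    altBounds (PySem.List.sorted (PySem.Set.ofList (opPts (O_vs_R ++ O_vs_R_hat))) (fun x => x)) us ue := by
  set pts := PySem.List.sorted (PySem.Set.ofList (opPts (O_vs_R ++ O_vs_R_hat))) (fun x => x) with hpts
  have hlt : pts.Pairwise (· < ·) := PySem.List.sorted_ofList_pairwise_lt _
  have hle : pts.Pairwise (· ≤ ·) := hlt.imp (fun h => le_of_lt h)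
  have hmem_pts : ∀ a, a ∈ pts ↔ a ∈ opPts (O_vs_R ++ O_vs_R_hat) := by
    intro a
    rw [hpts, PySem.List.mem_sorted, PySem.Set.mem_ofList]
  unfold altBounds
  rw [PySem.List.slice_natCast, slice_eq_filter pts us ue hle]
  rw [PySem.List.sorted_id_eq_sorted_id_iff_perm]
  rw [List.perm_ext_iff_of_nodup]
  · intro x
    rw [mem_aloop, mem_aloop, PySem.Set.mem_ofList, PySem.Set.mem_ofList]
    simp only [List.mem_cons, List.mem_filter, List.not_mem_nil, or_false,
      Bool.and_eq_true, decide_eq_true_eq, hmem_pts, opPts, List.flatMap_append,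
      List.mem_append]
    tauto
  · exact nodup_aloop us ue O_vs_R_hat _
      (nodup_aloop us ue O_vs_R _ (PySem.Set.nodup_ofList [us, ue]))
  · exact PySem.Set.nodup_ofList _

-- ===== VERDICT (by name: the statement is the Claim_ definition above) =====
theorem micro_boundaries_for_union_py_spec : Claim_equal_micro_boundaries_for_union_py := by
  intro mui OvR OvRh _
  unfold Spec_micro_boundaries_for_union_py
  unfold micro_boundaries_for_union_py micro_boundaries_for_union_py_alt
  rw [PySem.List.foldl_append_singleton_eq_map, PySem.List.foldl_append_singleton_eq_map]
  simp only [List.nil_append]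
  refine List.map_congr_left ?_
  intro p _
  have := per_interval OvR OvRh p.1 p.2
  simp only [opPts] at this
  exact congrArg (fun l => (p.1, p.2, l)) this
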